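-- pv_equiv track=rewrite | github.com/PUT-I/PUT-BDP-Steganography-LSB | application/LsbEncrypter.py | _bit_decryption_bgr
-- ===== SOURCE A (Python) =====
-- def _bit_decryption_bgr(img, bit_position: int):
--     result: str = ''
--     for row in img:
--         for pixel in row:
--             for channel in pixel:
--                 channel &= 2 ** (bit_position - 1)
--                 if channel == 2 ** (bit_position - 1):
--                     result += '1'
--                 else:
--                     result += '0'
--                 if len(result) % 8 == 0 and result.endswith('00000011'):
--                     return result
--     return result
-- ===== SOURCE B (Python) =====
-- def _bit_decryption_bgr(img, bit_position: int):
--     mask = 2 ** (bit_position - 1)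
--     bits = ''.join('1' if channel & mask else '0'
--                    for row in img for pixel in row for channel in pixel)
--     return _take_until_terminator(bits)
--
--
-- def _take_until_terminator(bits):
--     if len(bits) < 8:
--         return bits
--     if bits[:8] == '00000011':
--         return bits[:8]
--     return bits[:8] + _take_until_terminator(bits[8:])
-- ===== Notes on version B (the rewrite author's own statement) =====
-- stated objective: alternative
-- what changed: B is a staged two-phase algorithm: it first materializes the whole LSB bit-string by flattening the channels, then a separate recursive scanner walks it in 8-bit chunks and cuts the string at the first terminator byte ('00000011'), replacing A's single pass that re-tests len%8 and endswith on the growing result after every single bit.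
import Mathlib
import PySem

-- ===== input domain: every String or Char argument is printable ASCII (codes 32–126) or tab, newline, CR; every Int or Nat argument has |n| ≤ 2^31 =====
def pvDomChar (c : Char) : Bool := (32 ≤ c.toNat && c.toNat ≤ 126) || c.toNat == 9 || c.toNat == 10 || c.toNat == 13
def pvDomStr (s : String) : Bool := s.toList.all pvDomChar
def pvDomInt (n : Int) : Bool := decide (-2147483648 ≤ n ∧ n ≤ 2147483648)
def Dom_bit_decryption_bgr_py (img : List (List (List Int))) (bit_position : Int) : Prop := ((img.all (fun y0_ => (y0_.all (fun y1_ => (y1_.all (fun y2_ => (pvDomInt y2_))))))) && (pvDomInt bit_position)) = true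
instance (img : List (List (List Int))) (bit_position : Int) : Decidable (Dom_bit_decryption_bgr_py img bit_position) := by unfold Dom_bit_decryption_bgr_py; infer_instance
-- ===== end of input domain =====

-- B is a staged two-phase algorithm (materialize the whole bit-string, then scan it in 8-bit
-- chunks for the terminator byte) instead of A's per-bit len%8/endswith test on the growing result.

-- ===== PORT A =====
-- state: (returned-early flag, result); one step per channel
def pvAStep (mask : Int) (st : Bool × String) (c : Int) : Bool × String :=
  if st.1 then st
  else
    let r := st.2 ++ (if PySem.Int.band c mask == mask then "1" else "0")
    if PySem.Int.mod (PySem.Str.len r) 8 == 0 && PySem.Str.endswith r "00000011" then (true, r)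
    else (false, r)

def bit_decryption_bgr_py (img : List (List (List Int))) (bit_position : Int) : String :=
  -- Python's 2 ** (bit_position - 1); Pre_ restricts to bit_position ≥ 1 (or no channels),
  -- where the exponent is a Nat
  let mask : Int := 2 ^ (bit_position - 1).toNat
  (img.foldl (fun st row => row.foldl (fun st pixel => pixel.foldl (pvAStep mask) st) st)
    (false, "")).2

-- ===== PORT B =====
-- _take_until_terminator: recursive scan in 8-char chunks (Python slices ported as take/drop)
def pvTakeUntil (bits : List Char) : List Char :=
  if bits.length < 8 then bits
  else if bits.take 8 = "00000011".toList then bits.take 8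
  else bits.take 8 ++ pvTakeUntil (bits.drop 8)
termination_by bits.length
decreasing_by simp; omega

def bit_decryption_bgr_py_alt (img : List (List (List Int))) (bit_position : Int) : String :=
  let mask : Int := 2 ^ (bit_position - 1).toNat
  -- ''.join of the generator = flatten of the three nested iterations, one char per channel
  let bits : List Char :=
    img.flatMap (fun row => row.flatMap (fun pixel =>
      pixel.map (fun channel => if PySem.Int.band channel mask != 0 then '1' else '0')))
  String.ofList (pvTakeUntil bits)

-- ===== PRECONDITION & SPEC =====
-- Python raises TypeError (2**negative is a float, channel &= float) when bit_position < 1 and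
-- some channel exists; Pre_ admits exactly the inputs where A returns.
def Pre_bit_decryption_bgr_py (img : List (List (List Int))) (bit_position : Int) : Prop :=
  1 ≤ bit_position ∨ img.all (fun row => row.all (fun pixel => pixel.isEmpty)) = true
instance (img : List (List (List Int))) (bit_position : Int) : Decidable (Pre_bit_decryption_bgr_py img bit_position) := by unfold Pre_bit_decryption_bgr_py; infer_instance

def pvWitness_bit_decryption_bgr_py : List (List (List Int)) × Int := ([[[3, 1, 0], [1, 1, 1]]], 1)

def Spec_bit_decryption_bgr_py (img : List (List (List Int))) (bit_position : Int) (out : String) : Prop := out = bit_decryption_bgr_py_alt img bit_position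
instance (img : List (List (List Int))) (bit_position : Int) (out : String) : Decidable (Spec_bit_decryption_bgr_py img bit_position out) := by unfold Spec_bit_decryption_bgr_py; infer_instance

-- ===== CLAIM =====
def Claim_equal_bit_decryption_bgr_py : Prop := ∀ (img : List (List (List Int))) (bit_position : Int), Dom_bit_decryption_bgr_py img bit_position → Pre_bit_decryption_bgr_py img bit_position → Spec_bit_decryption_bgr_py img bit_position (bit_decryption_bgr_py img bit_position)

-- ===== LEMMAS AND PROOFS =====

-- A's band-with-a-power-of-two is 0 or the power itself
lemma pv_band_two_pow (c : Int) (k : Nat) :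
    PySem.Int.band c (2 ^ k) = 0 ∨ PySem.Int.band c (2 ^ k) = 2 ^ k := by
  have hcast : (2:Int) ^ k = ((2 ^ k : Nat) : Int) := by push_cast; ring
  rw [hcast]
  unfold PySem.Int.band
  have hb : (0:Int) ≤ ((2 ^ k : Nat) : Int) := by positivity
  by_cases hc : (0:Int) ≤ c
  · simp only [hc, hb, if_true]
    rw [Int.toNat_natCast]
    rcases Bool.eq_false_or_eq_true (c.toNat.testBit k) with h | h <;>
      simp [Nat.and_two_pow, h]
  · simp only [hc, hb, if_true, if_false]
    rw [Int.toNat_natCast]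
    rcases Bool.eq_false_or_eq_true (((-c).toNat - 1).testBit k) with h | h <;>
      simp [Nat.two_pow_and, h]

-- proof-level per-bit step: A's step with the produced character made explicit
def pvCStep (st : Bool × String) (ch : Char) : Bool × String :=
  if st.1 then st
  else
    let r := st.2 ++ String.ofList [ch]
    if PySem.Int.mod (PySem.Str.len r) 8 == 0 && PySem.Str.endswith r "00000011" then (true, r)
    else (false, r)

lemma pv_astep_eq (k : Nat) (st : Bool × String) (c : Int) :
    pvAStep (2 ^ k) st c = pvCStep st (if PySem.Int.band c (2 ^ k) != 0 then '1' else '0') := by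
  have hpow : (2:Int) ^ k ≠ 0 := by positivity
  rcases pv_band_two_pow c k with h0 | h0 <;>
    simp [pvAStep, pvCStep, h0, hpow, Ne.symm hpow,
      show ("0":String) = String.ofList ['0'] from rfl, show ("1":String) = String.ofList ['1'] from rfl]

lemma pv_mk_append (r s : List Char) : String.ofList r ++ String.ofList s = String.ofList (r ++ s) :=
  (String.ofList_append).symm

lemma pv_mod8 (x : List Char) :
    (PySem.Int.mod (PySem.Str.len (String.ofList x)) 8 == 0) = (x.length % 8 == 0) := by
  have h : PySem.Str.len (String.ofList x) = (x.length : Int) := by simp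
  rw [h, PySem.Int.mod, Int.fmod_eq_emod]
  · rcases Nat.decEq (x.length % 8) 0 with hne | he
    · have : ((x.length : Int)) % 8 ≠ 0 := by omega
      simp [this, hne]
    · have : ((x.length : Int)) % 8 = 0 := by omega
      simp [this, he]

lemma pv_suffix_of_eq_len {t x y : List Char} (h : t <:+ x ++ y) (hl : t.length = y.length) :
    t = y := by
  obtain ⟨u, hu⟩ := h
  exact (List.append_inj' hu hl).2

-- once the flag is set, the fold is inert
lemma pv_run_done (l : List Char) (s : String) :
    l.foldl pvCStep (true, s) = (true, s) := by
  induction l with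
  | nil => rfl
  | cons x xs ih => simpa [pvCStep] using ih

-- as long as no byte boundary is reached, the fold only appends
lemma pv_run_mid (l : List Char) (r : List Char)
    (h : ∀ j, 1 ≤ j → j ≤ l.length → (r.length + j) % 8 ≠ 0) :
    l.foldl pvCStep (false, String.ofList r) = (false, String.ofList (r ++ l)) := by
  induction l generalizing r with
  | nil => simp
  | cons x xs ih =>
    have h1 : (r.length + 1) % 8 ≠ 0 := h 1 (by omega) (by simp)
    have hcond : (PySem.Int.mod (PySem.Str.len (String.ofList (r ++ [x]))) 8 == 0) = false := by
      rw [pv_mod8]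
      simp [h1]
    have hstep : pvCStep (false, String.ofList r) x = (false, String.ofList (r ++ [x])) := by
      simp only [pvCStep, Bool.false_eq_true, if_false, pv_mk_append]
      rw [hcond]
      simp
    rw [List.foldl_cons, hstep, ih]
    · simp
    · intro j hj1 hj2
      have hx := h (j + 1) (by omega) (by simp only [List.length_cons]; omega)
      simp only [List.length_append, List.length_cons, List.length_nil]
      omega

-- running one full byte from an aligned state
lemma pv_run_byte (byte : List Char) (r : List Char) (h8 : byte.length = 8)
    (hr : r.length % 8 = 0) :
    byte.foldl pvCStep (false, String.ofList r) =
      (if byte = "00000011".toList then (true, String.ofList (r ++ byte))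
       else (false, String.ofList (r ++ byte))) := by
  have hsplit : byte = byte.take 7 ++ byte.drop 7 := (List.take_append_drop 7 byte).symm
  rw [hsplit, List.foldl_append]
  rw [pv_run_mid (byte.take 7) r (by
    intro j hj1 hj2
    have : (byte.take 7).length = 7 := by simp [h8]
    rw [this] at hj2
    omega)]
  obtain ⟨last, hlast⟩ : ∃ c, byte.drop 7 = [c] := by
    have : (byte.drop 7).length = 1 := by simp [h8]
    match hd : byte.drop 7 with
    | [c] => exact ⟨c, rfl⟩
    | [] => rw [hd] at this; simp at this
    | a :: b :: t => rw [hd] at this; simp at this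
  rw [hlast, List.foldl_cons, List.foldl_nil]
  have hb7 : byte.take 7 ++ [last] = byte := by
    conv_rhs => rw [hsplit, hlast]
  have hcond : (PySem.Int.mod (PySem.Str.len (String.ofList (r ++ byte))) 8 == 0) = true := by
    rw [pv_mod8]
    simp only [List.length_append, h8, beq_iff_eq]
    omega
  have hiff : PySem.Chars.endswith (r ++ byte) "00000011".toList = true ↔
      byte = "00000011".toList := by
    rw [PySem.Chars.endswith_iff]
    constructor
    · intro hsuf
      exact (pv_suffix_of_eq_len hsuf (by rw [h8]; rfl)).symm
    · intro hb
      rw [hb]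
      exact List.suffix_append _ _
  have hend : PySem.Str.endswith (String.ofList (r ++ byte)) "00000011"
      = decide (byte = "00000011".toList) := by
    rw [Bool.eq_iff_iff, decide_eq_true_iff]
    rw [PySem.Str.endswith_eq]
    simpa using hiff
  simp only [pvCStep, Bool.false_eq_true, if_false, pv_mk_append, List.append_assoc, hb7]
  rw [hcond, hend]
  by_cases hbyte : byte = "00000011".toList <;> simp [hbyte]

-- main invariant: the per-bit fold from an aligned clean state is the chunk scan
lemma pv_fold_eq_scan (n : Nat) : ∀ (bits r : List Char), bits.length ≤ n → r.length % 8 = 0 →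
    (bits.foldl pvCStep (false, String.ofList r)).2 = String.ofList (r ++ pvTakeUntil bits) := by
  induction n with
  | zero =>
    intro bits r hlen hr
    have : bits = [] := List.eq_nil_of_length_eq_zero (by omega)
    subst this
    rw [pvTakeUntil]
    simp
  | succ m ih =>
    intro bits r hlen hr
    by_cases hlt : bits.length < 8
    · rw [pv_run_mid bits r (by intro j hj1 hj2; omega)]
      conv_rhs => rw [pvTakeUntil]
      rw [if_pos hlt]
    · have hsplit : bits = bits.take 8 ++ bits.drop 8 := (List.take_append_drop 8 bits).symm
      have ht8 : (bits.take 8).length = 8 := by simp; omega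
      conv_lhs => rw [hsplit]
      rw [List.foldl_append, pv_run_byte (bits.take 8) r ht8 hr]
      by_cases hb : bits.take 8 = "00000011".toList
      · rw [if_pos hb, pv_run_done]
        conv_rhs => rw [pvTakeUntil]
        rw [if_neg hlt, if_pos hb]
      · rw [if_neg hb]
        rw [ih (bits.drop 8) (r ++ bits.take 8) (by simp; omega)
          (by simp only [List.length_append, ht8]; omega)]
        conv_rhs => rw [pvTakeUntil]
        rw [if_neg hlt, if_neg hb, ← List.append_assoc]

lemma pv_nest1 (bit : Int → Char) (row : List (List Int)) (st : Bool × String) :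
    row.foldl (fun st pixel => pixel.foldl (fun st c => pvCStep st (bit c)) st) st
      = (row.flatMap (fun px => px.map bit)).foldl pvCStep st := by
  induction row generalizing st with
  | nil => rfl
  | cons px rest ih =>
    simp only [List.foldl_cons, List.flatMap_cons, List.foldl_append, List.foldl_map, ih]

lemma pv_nest2 (bit : Int → Char) (img : List (List (List Int))) (st : Bool × String) :
    img.foldl (fun st row => row.foldl (fun st pixel =>
        pixel.foldl (fun st c => pvCStep st (bit c)) st) st) st
      = (img.flatMap (fun row => row.flatMap (fun px => px.map bit))).foldl pvCStep st := by
  induction img generalizing st with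
  | nil => rfl
  | cons row rest ih =>
    rw [List.foldl_cons, ih, pv_nest1, List.flatMap_cons, List.foldl_append]

-- ===== VERDICT =====
theorem bit_decryption_bgr_py_spec : Claim_equal_bit_decryption_bgr_py := by
  intro img bp _ _
  unfold Spec_bit_decryption_bgr_py bit_decryption_bgr_py bit_decryption_bgr_py_alt
  show (img.foldl (fun st row => row.foldl (fun st pixel =>
      pixel.foldl (pvAStep (2 ^ (bp - 1).toNat)) st) st) (false, "")).2 = _
  rw [show pvAStep (2 ^ (bp - 1).toNat)
      = (fun st c => pvCStep st (if PySem.Int.band c (2 ^ (bp - 1).toNat) != 0 then '1' else '0'))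
    from funext fun st => funext fun c => pv_astep_eq (bp - 1).toNat st c]
  rw [pv_nest2]
  rw [show ("" : String) = String.ofList [] from rfl,
    pv_fold_eq_scan _ _ [] le_rfl (by simp)]
  rfl
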